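-- pv_equiv track=rewrite | github.com/ThorbenP/wow-faction-rep-guides-for-guidelime | guides_generator/output.py | _step_count
-- ===== SOURCE A (Python) =====
-- def _step_count(quests: list[dict]) -> dict:
--     """Count expected QA / QC / QT stops in a quest list."""
--     qa = sum(1 for q in quests if q.get('pickup_coords'))
--     qc = sum(1 for q in quests if q.get('objective_coords'))
--     qt = sum(1 for q in quests if q.get('turnin_coords'))
--     no_pickup = sum(1 for q in quests if not q.get('pickup_coords') and not q.get('is_bridge'))
--     no_turnin = sum(1 for q in quests if not q.get('turnin_coords'))
--     return {
--         'qa': qa, 'qc': qc, 'qt': qt,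
--         'total_steps': qa + qc + qt,
--         'rep_quests_no_pickup': no_pickup,
--         'quests_no_turnin': no_turnin,
--     }
-- ===== SOURCE B (Python) =====
-- def _step_count(quests: list[dict]) -> dict:
--     """Count expected QA / QC / QT stops in a quest list (single pass)."""
--     qa = qc = qt = no_pickup = no_turnin = 0
--     for q in quests:
--         if q.get('pickup_coords'):
--             qa += 1
--         elif not q.get('is_bridge'):
--             no_pickup += 1
--         if q.get('objective_coords'):
--             qc += 1
--         if q.get('turnin_coords'):
--             qt += 1
--         else:
--             no_turnin += 1
--     return {
--         'qa': qa, 'qc': qc, 'qt': qt,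
--         'total_steps': qa + qc + qt,
--         'rep_quests_no_pickup': no_pickup,
--         'quests_no_turnin': no_turnin,
--     }
-- ===== Notes on version B (the rewrite author's own statement) =====
-- stated objective: alternative
-- what changed: Replaced A's five separate comprehension passes over the quest list with one loop maintaining five counters (pickup handled by if/elif so the no-pickup/is_bridge test disappears as a separate pass).
import Mathlib
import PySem

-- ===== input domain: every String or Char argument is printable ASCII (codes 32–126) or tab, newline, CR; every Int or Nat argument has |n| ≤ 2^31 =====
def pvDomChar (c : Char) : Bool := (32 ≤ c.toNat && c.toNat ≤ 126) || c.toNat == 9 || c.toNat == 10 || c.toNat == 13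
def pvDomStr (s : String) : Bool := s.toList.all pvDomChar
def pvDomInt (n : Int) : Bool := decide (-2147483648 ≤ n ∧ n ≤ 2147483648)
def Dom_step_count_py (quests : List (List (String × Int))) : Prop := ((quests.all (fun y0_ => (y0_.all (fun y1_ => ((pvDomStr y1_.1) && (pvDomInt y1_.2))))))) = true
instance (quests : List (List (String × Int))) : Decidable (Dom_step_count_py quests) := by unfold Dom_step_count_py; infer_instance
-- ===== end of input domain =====

-- B replaces A's five comprehension passes over the quest list with one loop
-- maintaining five counters (objective: alternative decomposition, same cost class).


-- q.get(k) truthiness: the key's first binding is present and non-zero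
def pvGetTruthy (q : List (String × Int)) (k : String) : Bool :=
  match q.find? (fun p => p.1 == k) with
  | some p => p.2 != 0
  | none => false

-- ===== PORT A =====
def step_count_py (quests : List (List (String × Int))) : List (String × Int) :=
  let qa : Int := (quests.countP (fun q => pvGetTruthy q "pickup_coords") : Nat)
  let qc : Int := (quests.countP (fun q => pvGetTruthy q "objective_coords") : Nat)
  let qt : Int := (quests.countP (fun q => pvGetTruthy q "turnin_coords") : Nat)
  let no_pickup : Int :=
    (quests.countP (fun q => !pvGetTruthy q "pickup_coords" && !pvGetTruthy q "is_bridge") : Nat)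
  let no_turnin : Int := (quests.countP (fun q => !pvGetTruthy q "turnin_coords") : Nat)
  [("qa", qa), ("qc", qc), ("qt", qt), ("total_steps", qa + qc + qt),
   ("rep_quests_no_pickup", no_pickup), ("quests_no_turnin", no_turnin)]

-- ===== PORT B =====
def step_count_py_alt (quests : List (List (String × Int))) : List (String × Int) :=
  let r := quests.foldl
    (fun (acc : Int × Int × Int × Int × Int) q =>
      let (qa, qc, qt, np, nt) := acc
      let qa' := if pvGetTruthy q "pickup_coords" then qa + 1 else qa
      let np' := if pvGetTruthy q "pickup_coords" then np
                 else if pvGetTruthy q "is_bridge" then np else np + 1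
      let qc' := if pvGetTruthy q "objective_coords" then qc + 1 else qc
      let qt' := if pvGetTruthy q "turnin_coords" then qt + 1 else qt
      let nt' := if pvGetTruthy q "turnin_coords" then nt else nt + 1
      (qa', qc', qt', np', nt'))
    (0, 0, 0, 0, 0)
  let (qa, qc, qt, np, nt) := r
  [("qa", qa), ("qc", qc), ("qt", qt), ("total_steps", qa + qc + qt),
   ("rep_quests_no_pickup", np), ("quests_no_turnin", nt)]

-- ===== PRECONDITION & SPEC =====
def Spec_step_count_py (quests : List (List (String × Int))) (out : List (String × Int)) : Prop := out = step_count_py_alt quests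
instance (quests : List (List (String × Int))) (out : List (String × Int)) : Decidable (Spec_step_count_py quests out) := by unfold Spec_step_count_py; infer_instance

-- ===== CLAIM (what is proved, stated in full; the proofs are below) =====
def Claim_equal_step_count_py : Prop := ∀ (quests : List (List (String × Int))), Dom_step_count_py quests → Spec_step_count_py quests (step_count_py quests)

-- ===== LEMMAS AND PROOFS =====
theorem pv_foldl_counts (quests : List (List (String × Int)))
    (acc : Int × Int × Int × Int × Int) :
    quests.foldl
      (fun (acc : Int × Int × Int × Int × Int) q =>
        let (qa, qc, qt, np, nt) := acc
        let qa' := if pvGetTruthy q "pickup_coords" then qa + 1 else qa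
        let np' := if pvGetTruthy q "pickup_coords" then np
                   else if pvGetTruthy q "is_bridge" then np else np + 1
        let qc' := if pvGetTruthy q "objective_coords" then qc + 1 else qc
        let qt' := if pvGetTruthy q "turnin_coords" then qt + 1 else qt
        let nt' := if pvGetTruthy q "turnin_coords" then nt else nt + 1
        (qa', qc', qt', np', nt')) acc
    = (acc.1 + (quests.countP (fun q => pvGetTruthy q "pickup_coords") : Nat),
       acc.2.1 + (quests.countP (fun q => pvGetTruthy q "objective_coords") : Nat),
       acc.2.2.1 + (quests.countP (fun q => pvGetTruthy q "turnin_coords") : Nat),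
       acc.2.2.2.1 + (quests.countP (fun q => !pvGetTruthy q "pickup_coords" && !pvGetTruthy q "is_bridge") : Nat),
       acc.2.2.2.2 + (quests.countP (fun q => !pvGetTruthy q "turnin_coords") : Nat)) := by
  induction quests generalizing acc with
  | nil => simp
  | cons q rest ih =>
    obtain ⟨qa, qc, qt, np, nt⟩ := acc
    simp only [List.foldl_cons, List.countP_cons, ih]
    by_cases hp : pvGetTruthy q "pickup_coords" <;>
      by_cases hb : pvGetTruthy q "is_bridge" <;>
      by_cases hc : pvGetTruthy q "objective_coords" <;>
      by_cases ht : pvGetTruthy q "turnin_coords" <;>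
      simp [hp, hb, hc, ht, Prod.ext_iff] <;> omega

-- ===== VERDICT (by name: the statement is the Claim_ definition above) =====
theorem step_count_py_spec : Claim_equal_step_count_py := by
  intro quests _
  unfold Spec_step_count_py step_count_py step_count_py_alt
  simp only [pv_foldl_counts]
  norm_num
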